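-- pv_equiv track=rewrite | github.com/eldari77/nOVALi | novali-v7_rc00-standalone/operator_shell/operator_alerts/status.py | _select_focus_alert
-- ===== SOURCE A (Python) =====
-- from typing import Any, Mapping
--
-- def _select_focus_alert(alerts: list[dict[str, Any]]) -> dict[str, Any]:
--     priority = {
--         "blocked_waiting_operator": 0,
--         "raised": 1,
--         "acknowledged": 2,
--         "reviewed": 3,
--     }
--     focused = sorted(
--         (
--             alert
--             for alert in alerts
--             if str(alert.get("status", "")).strip() in priority
--         ),
--         key=lambda alert: (
--             priority.get(str(alert.get("status", "")).strip(), 99),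
--             str(alert.get("updated_at", "") or alert.get("created_at", "")),
--         ),
--     )
--     if focused:
--         return focused[0]
--     return alerts[0] if alerts else {}
-- ===== SOURCE B (Python) =====
-- def _select_focus_alert(alerts):
--     priority = {
--         "blocked_waiting_operator": 0,
--         "raised": 1,
--         "acknowledged": 2,
--         "reviewed": 3,
--     }
--     best = None  # (key, alert): running minimum over one pass
--     for alert in alerts:
--         rank = priority.get(str(alert.get("status", "")).strip())
--         if rank is None:
--             continue
--         key = (rank, str(alert.get("updated_at", "") or alert.get("created_at", "")))
--         if best is None or key < best[0]:
--             best = (key, alert)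
--     if best is not None:
--         return best[1]
--     return alerts[0] if alerts else {}
-- ===== Notes on version B (the rewrite author's own statement) =====
-- stated objective: alternative
-- what changed: B replaces A's filter-then-stable-sort of all matching alerts by a single running-minimum pass that keeps the best (priority rank, timestamp) key seen so far, with strict-less replacement reproducing the stable sort's first-wins tie-breaking.
import Mathlib
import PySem

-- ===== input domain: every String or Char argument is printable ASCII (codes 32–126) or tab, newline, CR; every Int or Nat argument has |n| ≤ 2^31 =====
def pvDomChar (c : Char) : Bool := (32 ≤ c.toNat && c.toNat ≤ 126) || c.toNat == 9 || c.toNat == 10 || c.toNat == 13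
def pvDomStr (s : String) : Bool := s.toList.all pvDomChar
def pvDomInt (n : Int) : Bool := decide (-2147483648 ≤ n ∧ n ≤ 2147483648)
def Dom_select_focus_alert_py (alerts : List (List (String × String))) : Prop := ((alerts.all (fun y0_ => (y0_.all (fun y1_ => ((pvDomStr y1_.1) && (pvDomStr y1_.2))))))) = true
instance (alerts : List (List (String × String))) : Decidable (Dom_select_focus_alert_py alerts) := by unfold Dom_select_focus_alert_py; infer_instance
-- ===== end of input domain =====

-- B replaces A's filter-then-stable-sort by a single running-minimum pass (same result, no sort).

-- Shared field expressions (both Pythons compute these identical sub-expressions):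
-- alert.get(k, dflt) on the assoc-list dict (first match wins)
def pvGet (a : List (String × String)) (k dflt : String) : String :=
  match a.find? (fun p => p.1 == k) with
  | some p => p.2
  | none => dflt

-- the literal priority dict both Pythons define
def pvPriority : PySem.Dict String Int :=
  PySem.Dict.ofList [("blocked_waiting_operator", 0), ("raised", 1), ("acknowledged", 2), ("reviewed", 3)]

-- str(alert.get("status", "")).strip()
def pvStatus (a : List (String × String)) : String := PySem.Str.strip (pvGet a "status" "")

-- str(alert.get("updated_at", "") or alert.get("created_at", ""))
def pvTs (a : List (String × String)) : String :=
  let u := pvGet a "updated_at" ""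
  if u = "" then pvGet a "created_at" "" else u

-- ===== PORT A =====
def select_focus_alert_py (alerts : List (List (String × String))) : List (String × String) :=
  let focused := PySem.List.sorted2
      (alerts.filter (fun a => pvPriority.contains (pvStatus a)))
      (fun a => pvPriority.getD (pvStatus a) 99) (fun a => pvTs a)
  match focused with
  | m :: _ => m
  | [] =>
    match alerts with
    | a0 :: _ => a0
    | [] => []

-- ===== PORT B =====
def select_focus_alert_py_alt (alerts : List (List (String × String))) : List (String × String) :=
  let best := alerts.foldl (fun best a =>
    match pvPriority.get? (pvStatus a) with
    | none => best
    | some rank =>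
      let key : Int × String := (rank, pvTs a)
      match best with
      | none => some (key, a)
      | some (bk, _) =>
        if key.1 < bk.1 ∨ (key.1 = bk.1 ∧ key.2 < bk.2) then some (key, a) else best)
    (none : Option ((Int × String) × List (String × String)))
  match best with
  | some (_, m) => m
  | none =>
    match alerts with
    | a0 :: _ => a0
    | [] => []

-- ===== PRECONDITION & SPEC =====
def Spec_select_focus_alert_py (alerts : List (List (String × String))) (out : List (String × String)) : Prop := out = select_focus_alert_py_alt alerts
instance (alerts : List (List (String × String))) (out : List (String × String)) : Decidable (Spec_select_focus_alert_py alerts out) := by unfold Spec_select_focus_alert_py; infer_instance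

-- ===== CLAIM (what is proved, stated in full; the proofs are below) =====
def Claim_equal_select_focus_alert_py : Prop := ∀ (alerts : List (List (String × String))), Dom_select_focus_alert_py alerts → Spec_select_focus_alert_py alerts (select_focus_alert_py alerts)

-- ===== LEMMAS AND PROOFS =====

-- proof-only names for the A-side fold step (the selection A's stable sort induces)
def pvSelA (o : Option (List (String × String))) (x : List (String × String)) :
    Option (List (String × String)) :=
  match o with
  | none => some x
  | some m =>
    if (decide (pvPriority.getD (pvStatus x) 99 < pvPriority.getD (pvStatus m) 99) ||
        (!decide (pvPriority.getD (pvStatus m) 99 < pvPriority.getD (pvStatus x) 99) &&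
         decide (pvTs x < pvTs m))) then some x else some m

def pvFA (o : Option (List (String × String))) (x : List (String × String)) :
    Option (List (String × String)) :=
  if pvPriority.contains (pvStatus x) then pvSelA o x else o

theorem pv_head?_insertBy {α : Type} (before : α → α → Bool) (x : α) (l : List α) :
    (PySem.List.insertBy before x l).head? =
      some (match l with | [] => x | y :: _ => if before x y then x else y) := by
  cases l with
  | nil => simp [PySem.List.insertBy]
  | cons y ys =>
    by_cases h : before x y = true <;> simp [PySem.List.insertBy, h]

theorem pv_head?_foldl_insertBy {α : Type} (before : α → α → Bool) (xs : List α) (acc : List α) :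
    (xs.foldl (fun acc x => PySem.List.insertBy before x acc) acc).head? =
      xs.foldl (fun o x =>
        match o with
        | none => some x
        | some m => if before x m then some x else some m) acc.head? := by
  induction xs generalizing acc with
  | nil => rfl
  | cons x xs ih =>
    rw [List.foldl_cons, List.foldl_cons, ih]
    congr 1
    rw [pv_head?_insertBy]
    cases acc
    · simp
    · simp
      split <;> rfl


-- abbreviation used only by the proofs: pair each candidate with its composite key (B's accumulator view of A's)
def pvG (o : Option (List (String × String))) : Option ((Int × String) × List (String × String)) :=
  o.map (fun m => ((pvPriority.getD (pvStatus m) 99, pvTs m), m))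

theorem pv_sorted2_head {α κ₁ κ₂ : Type} [LT κ₁] [DecidableLT κ₁] [LT κ₂] [DecidableLT κ₂]
    (xs : List α) (k1 : α → κ₁) (k2 : α → κ₂) :
    (PySem.List.sorted2 xs k1 k2).head? =
      xs.foldl (fun o x =>
        match o with
        | none => some x
        | some m =>
          if (decide (k1 x < k1 m) || (!decide (k1 m < k1 x) && decide (k2 x < k2 m)))
          then some x else some m) none := by
  simp only [PySem.List.sorted2, Bool.false_eq_true, if_false]
  rw [pv_head?_foldl_insertBy]
  rfl

theorem pv_step_commute (o : Option (List (String × String))) (a : List (String × String)) :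
    (fun best a =>
      match pvPriority.get? (pvStatus a) with
      | none => best
      | some rank =>
        let key : Int × String := (rank, pvTs a)
        match best with
        | none => some (key, a)
        | some (bk, _) =>
          if key.1 < bk.1 ∨ (key.1 = bk.1 ∧ key.2 < bk.2) then some (key, a) else best) (pvG o) a =
    pvG (pvFA o a) := by
  unfold pvFA pvSelA
  cases hg : pvPriority.get? (pvStatus a) with
  | none =>
    have hc : pvPriority.contains (pvStatus a) = false := by
      rw [PySem.Dict.contains_eq_isSome_get?, hg]; rfl
    simp [hg, hc]
  | some r =>
    have hc : pvPriority.contains (pvStatus a) = true := by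
      rw [PySem.Dict.contains_eq_isSome_get?, hg]; rfl
    have hk1 : pvPriority.getD (pvStatus a) 99 = r := by
      simp [PySem.Dict.getD, hg]
    cases o with
    | none => simp [hg, hc, pvG, hk1]
    | some m =>
      simp only [hg, hc, pvG, Option.map_some, if_true]
      by_cases h1 : r < pvPriority.getD (pvStatus m) 99
      · have h1' : ¬ pvPriority.getD (pvStatus m) 99 < r := by omega
        simp [h1, h1', hk1]
      · by_cases h2 : pvPriority.getD (pvStatus m) 99 < r
        · have h2' : ¬ r = pvPriority.getD (pvStatus m) 99 := by omega
          simp [hk1, h1, h2, h2']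
        · have he : r = pvPriority.getD (pvStatus m) 99 := by omega
          by_cases h3 : pvTs a < pvTs m
          · simp [hk1, he, h3]
          · simp [hk1, he, h3]

theorem pv_fold_commute (alerts : List (List (String × String))) :
    alerts.foldl (fun best a =>
      match pvPriority.get? (pvStatus a) with
      | none => best
      | some rank =>
        let key : Int × String := (rank, pvTs a)
        match best with
        | none => some (key, a)
        | some (bk, _) =>
          if key.1 < bk.1 ∨ (key.1 = bk.1 ∧ key.2 < bk.2) then some (key, a) else best)
      (none : Option ((Int × String) × List (String × String))) =
    pvG (alerts.foldl pvFA none) := by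
  simpa only [pvG, Option.map_none] using List.foldl_hom (f := pvG) (g₁ := pvFA)
    (g₂ := fun best a =>
      match pvPriority.get? (pvStatus a) with
      | none => best
      | some rank =>
        let key : Int × String := (rank, pvTs a)
        match best with
        | none => some (key, a)
        | some (bk, _) =>
          if key.1 < bk.1 ∨ (key.1 = bk.1 ∧ key.2 < bk.2) then some (key, a) else best)
    (l := alerts) (init := none)
    (fun o a => pv_step_commute o a)

theorem pv_sorted_head_eq_foldA (alerts : List (List (String × String))) :
    (PySem.List.sorted2
      (alerts.filter (fun a => pvPriority.contains (pvStatus a)))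
      (fun a => pvPriority.getD (pvStatus a) 99) (fun a => pvTs a)).head? =
    alerts.foldl pvFA none := by
  rw [pv_sorted2_head, List.foldl_filter]
  congr 1
  funext o x
  unfold pvFA pvSelA
  cases o <;> rfl

theorem select_focus_alert_py_spec : Claim_equal_select_focus_alert_py := by
  intro alerts _
  unfold Spec_select_focus_alert_py select_focus_alert_py select_focus_alert_py_alt
  simp only
  rw [pv_fold_commute, ← pv_sorted_head_eq_foldA]
  cases PySem.List.sorted2
      (alerts.filter (fun a => pvPriority.contains (pvStatus a)))
      (fun a => pvPriority.getD (pvStatus a) 99) (fun a => pvTs a) with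
  | nil => simp [pvG]
  | cons m t => simp [pvG]
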